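-- pv_equiv track=rewrite | github.com/putrahaidar-jun/math-ctf-challenge | python/assr.py | integer_fourth_root
-- ===== SOURCE A (Python) =====
-- def integer_fourth_root(n: int) -> int:
--     # returns floor(n ** 0.25) without floats
--     low, high = 0, 1
--     while high ** 4 <= n:
--         high *= 2
--     while low + 1 < high:
--         mid = (low + high) // 2
--         if mid ** 4 <= n:
--             low = mid
--         else:
--             high = mid
--     return low
-- ===== SOURCE B (Python) =====
-- import math
--
-- def integer_fourth_root(n: int) -> int:
--     if n < 0:
--         return 0
--     return math.isqrt(math.isqrt(n))
-- ===== Notes on version B (the rewrite author's own statement) =====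
-- stated objective: idiomatic
-- what changed: Replaced the exponential upper-bound doubling loop plus binary search with a closed-form double application of math.isqrt (floor fourth root = isqrt of isqrt for nonnegative input), with a guard matching A's behaviour on negative inputs.
import Mathlib
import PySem

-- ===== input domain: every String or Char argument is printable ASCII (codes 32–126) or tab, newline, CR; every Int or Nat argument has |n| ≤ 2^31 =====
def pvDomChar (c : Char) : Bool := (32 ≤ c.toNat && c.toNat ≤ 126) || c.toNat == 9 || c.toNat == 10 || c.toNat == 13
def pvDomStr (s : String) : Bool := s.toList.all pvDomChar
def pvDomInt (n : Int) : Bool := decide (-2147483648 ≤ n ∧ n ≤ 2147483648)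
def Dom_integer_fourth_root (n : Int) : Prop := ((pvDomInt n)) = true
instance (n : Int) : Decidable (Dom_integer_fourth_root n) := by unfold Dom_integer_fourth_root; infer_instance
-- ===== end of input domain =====

-- B replaces A's doubling + binary-search loops with isqrt(isqrt n); equivalence proved via the
-- characterisation r ≥ 0 ∧ r^4 ≤ n < (r+1)^4 of floor fourth root (both programs return 0 for n < 0).

-- ===== PORT A =====
-- first while loop of A: while high ** 4 <= n: high *= 2   (the 1 ≤ high argument is only for termination)
def ifrGrow (n high : Int) (h : 1 ≤ high) : Int :=
  if hc : high ^ 4 ≤ n then ifrGrow n (high * 2) (by omega) else high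
termination_by (n.toNat + 1 - high.toNat)
decreasing_by
  have h1 : high ≤ high ^ 4 := by
    nlinarith [sq_nonneg high, sq_nonneg (high - 1), sq_nonneg (high * high - 1)]
  omega

-- second while loop of A: while low + 1 < high: mid = (low + high) // 2; …
def ifrBS (n low high : Int) : Int :=
  if hc : low + 1 < high then
    let mid := PySem.Int.floordiv (low + high) 2
    if mid ^ 4 ≤ n then ifrBS n mid high else ifrBS n low mid
  else low
termination_by (high - low).toNat
decreasing_by
  · have h1 : low + 1 ≤ PySem.Int.floordiv (low + high) 2 :=
      (PySem.Int.le_floordiv_iff_mul_le (by omega)).2 (by omega)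
    omega
  · have h2 : PySem.Int.floordiv (low + high) 2 < high :=
      (PySem.Int.floordiv_lt_iff_lt_mul (by omega)).2 (by omega)
    have h1 : low + 1 ≤ PySem.Int.floordiv (low + high) 2 :=
      (PySem.Int.le_floordiv_iff_mul_le (by omega)).2 (by omega)
    omega

def integer_fourth_root (n : Int) : Int :=
  ifrBS n 0 (ifrGrow n 1 (by omega))

-- ===== PORT B =====
def integer_fourth_root_alt (n : Int) : Int :=
  if n < 0 then 0 else ((Nat.sqrt (Nat.sqrt n.toNat) : Nat) : Int)

-- ===== PRECONDITION & SPEC =====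
def Spec_integer_fourth_root (n : Int) (out : Int) : Prop := out = integer_fourth_root_alt n
instance (n : Int) (out : Int) : Decidable (Spec_integer_fourth_root n out) := by unfold Spec_integer_fourth_root; infer_instance

-- ===== CLAIM (what is proved, stated in full; the proofs are below) =====
def Claim_equal_integer_fourth_root : Prop := ∀ (n : Int), Dom_integer_fourth_root n → Spec_integer_fourth_root n (integer_fourth_root n)

-- ===== LEMMAS AND PROOFS =====

theorem ifrGrow_spec (n high : Int) (h : 1 ≤ high) :
    1 ≤ ifrGrow n high h ∧ n < (ifrGrow n high h) ^ 4 := by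
  induction high, h using ifrGrow.induct n with
  | case1 high h hc ih => rw [ifrGrow]; simpa [hc] using ih
  | case2 high h hc => rw [ifrGrow]; simp [hc]; omega

theorem ifrBS_spec (n low high : Int) (h0 : 0 ≤ low) (hlt : low < high)
    (hl : low ^ 4 ≤ n) (hh : n < high ^ 4) :
    0 ≤ ifrBS n low high ∧ (ifrBS n low high) ^ 4 ≤ n ∧ n < (ifrBS n low high + 1) ^ 4 := by
  induction low, high using ifrBS.induct n with
  | case1 low high hc mid hle ih =>
    have hmideq : mid = PySem.Int.floordiv (low + high) 2 := rfl
    have h1 : low + 1 ≤ mid := by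
      rw [hmideq]; exact (PySem.Int.le_floordiv_iff_mul_le (by omega)).2 (by omega)
    have h2 : mid < high := by
      rw [hmideq]; exact (PySem.Int.floordiv_lt_iff_lt_mul (by omega)).2 (by omega)
    rw [ifrBS]; simp only [hc, dite_true]
    rw [if_pos (hmideq ▸ hle)]
    exact ih (by omega) (by omega) hle hh
  | case2 low high hc mid hle ih =>
    have hmideq : mid = PySem.Int.floordiv (low + high) 2 := rfl
    have h1 : low + 1 ≤ mid := by
      rw [hmideq]; exact (PySem.Int.le_floordiv_iff_mul_le (by omega)).2 (by omega)
    rw [ifrBS]; simp only [hc, dite_true]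
    rw [if_neg (hmideq ▸ hle)]
    exact ih h0 (by omega) hl (by rw [hmideq] at hle ⊢; omega)
  | case3 low high hc =>
    rw [ifrBS]; simp only [hc, dite_false]
    have heq : high = low + 1 := by omega
    exact ⟨h0, hl, heq ▸ hh⟩

theorem fourth_unique (a b n : Int) (ha : 0 ≤ a) (hb : 0 ≤ b)
    (h1 : a ^ 4 ≤ n) (h2 : n < (a + 1) ^ 4) (h3 : b ^ 4 ≤ n) (h4 : n < (b + 1) ^ 4) : a = b := by
  rcases lt_trichotomy a b with h | h | h
  · exfalso
    have : (a + 1) ^ 4 ≤ b ^ 4 := pow_le_pow_left₀ (by omega) (by omega) 4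
    omega
  · exact h
  · exfalso
    have : (b + 1) ^ 4 ≤ a ^ 4 := pow_le_pow_left₀ (by omega) (by omega) 4
    omega

theorem alt_spec (n : Int) (hn : 0 ≤ n) :
    0 ≤ integer_fourth_root_alt n ∧ (integer_fourth_root_alt n) ^ 4 ≤ n ∧
      n < (integer_fourth_root_alt n + 1) ^ 4 := by
  unfold integer_fourth_root_alt
  rw [if_neg (by omega)]
  set m := n.toNat with hm
  set s1 := Nat.sqrt m with hs1
  set s := Nat.sqrt s1 with hs
  have hnm : n = (m : Int) := by omega
  have h1 : s ^ 2 ≤ s1 := by simpa [pow_two] using Nat.sqrt_le' s1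
  have h2 : s1 ^ 2 ≤ m := by simpa [pow_two] using Nat.sqrt_le' m
  have h3 : s1 < (s + 1) ^ 2 := by
    have := Nat.lt_succ_sqrt' s1
    simpa [pow_two, Nat.succ_eq_add_one] using this
  have h4 : m < (s1 + 1) ^ 2 := by
    have := Nat.lt_succ_sqrt' m
    simpa [pow_two, Nat.succ_eq_add_one] using this
  have hlo : s ^ 4 ≤ m := by
    calc s ^ 4 = (s ^ 2) ^ 2 := by ring
    _ ≤ s1 ^ 2 := Nat.pow_le_pow_left h1 2
    _ ≤ m := h2
  have hhi : m < (s + 1) ^ 4 := by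
    calc m < (s1 + 1) ^ 2 := h4
    _ ≤ ((s + 1) ^ 2) ^ 2 := Nat.pow_le_pow_left (by omega) 2
    _ = (s + 1) ^ 4 := by ring
  refine ⟨by positivity, ?_, ?_⟩
  · rw [hnm]; exact_mod_cast hlo
  · rw [hnm]; exact_mod_cast hhi

theorem integer_fourth_root_spec : Claim_equal_integer_fourth_root := by
  intro n _
  unfold Spec_integer_fourth_root
  by_cases hn : 0 ≤ n
  · have hg := ifrGrow_spec n 1 (by omega)
    have ha := ifrBS_spec n 0 (ifrGrow n 1 (by omega)) (by omega) (by omega)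
      (by simpa using hn) hg.2
    have hb := alt_spec n hn
    exact fourth_unique _ _ n ha.1 hb.1 ha.2.1 ha.2.2 hb.2.1 hb.2.2
  · have hg : ifrGrow n 1 (by omega) = 1 := by
      rw [ifrGrow]; rw [dif_neg (by omega)]
    unfold integer_fourth_root
    rw [hg, ifrBS, dif_neg (by omega)]
    unfold integer_fourth_root_alt
    rw [if_pos (by omega)]
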